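-- pv_equiv track=rewrite | github.com/Airyshtoteles/learnLeetCode | Day79/Part6/mana_redistribution.py | can_achieve
-- ===== SOURCE A (Python) =====
-- def can_achieve(target, k, mana):
--     needed = 0
--     available = 0
--     for m in mana:
--         if m < target:
--             needed += (target - m)
--         else:
--             available += (m - target)
--
--     # We need enough available mana to cover the need.
--     # And the total amount moved (needed) must not exceed k.
--     return needed <= available and needed <= k
-- ===== SOURCE B (Python) =====
-- def can_achieve(target, k, mana):
--     s = sorted(mana)
--     lo, hi = 0, len(s)
--     while lo < hi:
--         mid = (lo + hi) // 2
--         if s[mid] < target: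
--             lo = mid + 1
--         else:
--             hi = mid
--     needed = target * lo - sum(s[:lo])
--     return needed <= k and sum(s) >= target * len(s)
-- ===== Notes on version B (the rewrite author's own statement) =====
-- stated objective: alternative
-- what changed: B sorts the list, locates the deficit boundary with a hand-written binary search, and computes the deficit from a prefix sum (target*lo - sum(s[:lo])), replacing A's single pass with two branched accumulators; the surplus check becomes total >= target*len.
import Mathlib
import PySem

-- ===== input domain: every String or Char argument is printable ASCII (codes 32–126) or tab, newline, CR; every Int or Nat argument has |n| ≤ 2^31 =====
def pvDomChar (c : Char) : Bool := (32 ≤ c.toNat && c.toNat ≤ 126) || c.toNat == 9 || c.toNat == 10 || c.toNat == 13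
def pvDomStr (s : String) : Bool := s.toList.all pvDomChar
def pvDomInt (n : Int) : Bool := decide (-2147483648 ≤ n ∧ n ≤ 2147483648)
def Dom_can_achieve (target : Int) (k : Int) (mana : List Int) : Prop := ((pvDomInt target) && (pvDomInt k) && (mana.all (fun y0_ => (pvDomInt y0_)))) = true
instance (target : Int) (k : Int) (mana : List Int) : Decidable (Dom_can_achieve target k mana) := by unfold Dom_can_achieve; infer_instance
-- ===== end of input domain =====

-- B sorts, binary-searches the deficit boundary and uses prefix sums instead of A's one-pass two-accumulator loop; same result, different algorithm.

-- ===== PORT A =====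
-- Literal port of A: one loop maintaining (needed, available), then `needed <= available and needed <= k`.
def can_achieve (target : Int) (k : Int) (mana : List Int) : Bool :=
  let st := mana.foldl (fun (st : Int × Int) m =>
    if m < target then (st.1 + (target - m), st.2) else (st.1, st.2 + (m - target))) (0, 0)
  decide (st.1 ≤ st.2) && decide (st.1 ≤ k)

-- ===== PORT B =====
-- B's while-loop binary search; lo/hi are nonnegative Python ints bounded by len(s), so Nat with
-- Nat division matches Python's `(lo + hi) // 2` exactly; `s[mid]` with 0 ≤ mid < len(s) is `getD mid 0`.
def caBsearch (s : List Int) (target : Int) (lo hi : Nat) : Nat :=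
  if _h : lo < hi then
    let mid := (lo + hi) / 2
    if s.getD mid 0 < target then caBsearch s target (mid + 1) hi
    else caBsearch s target lo mid
  else lo
termination_by hi - lo
decreasing_by all_goals omega

-- Port of B: sort, binary search for the first element ≥ target, deficit from the prefix sum.
def can_achieve_alt (target : Int) (k : Int) (mana : List Int) : Bool :=
  let s := PySem.List.sorted mana (fun x => x) false
  let lo := caBsearch s target 0 s.length
  let needed := target * (lo : Int) - (s.take lo).sum
  decide (needed ≤ k) && decide (s.sum ≥ target * (s.length : Int))

-- ===== PRECONDITION & SPEC =====
def Spec_can_achieve (target : Int) (k : Int) (mana : List Int) (out : Bool) : Prop := out = can_achieve_alt target k mana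
instance (target : Int) (k : Int) (mana : List Int) (out : Bool) : Decidable (Spec_can_achieve target k mana out) := by unfold Spec_can_achieve; infer_instance

-- ===== CLAIM (what is proved, stated in full; the proofs are below) =====
def Claim_equal_can_achieve : Prop := ∀ (target : Int) (k : Int) (mana : List Int), Dom_can_achieve target k mana → Spec_can_achieve target k mana (can_achieve target k mana)

-- ===== LEMMAS AND PROOFS =====

-- A's loop from any start state adds the deficit sum to `needed` and the surplus sum to `available`.
theorem canAchieve_loopA (target : Int) (mana : List Int) : ∀ (n a : Int),
    mana.foldl (fun (st : Int × Int) m =>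
      if m < target then (st.1 + (target - m), st.2) else (st.1, st.2 + (m - target))) (n, a)
    = (n + (mana.map (fun m => max 0 (target - m))).sum,
       a + (mana.map (fun m => max 0 (m - target))).sum) := by
  induction mana with
  | nil => intro n a; simp
  | cons x xs ih =>
    intro n a
    simp only [List.foldl_cons, List.map_cons, List.sum_cons]
    by_cases h : x < target
    · simp only [if_pos h, ih]
      have h1 : max 0 (target - x) = target - x := by omega
      have h2 : max 0 (x - target) = 0 := by omega
      rw [h1, h2]; simp only [Prod.mk.injEq]; constructor <;> ring
    · simp only [if_neg h, ih]
      have h1 : max 0 (target - x) = 0 := by omega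
      have h2 : max 0 (x - target) = x - target := by omega
      rw [h1, h2]; simp only [Prod.mk.injEq]; constructor <;> ring

-- surplus − deficit = total − target·len
theorem canAchieve_balance (target : Int) (mana : List Int) :
    (mana.map (fun m => max 0 (m - target))).sum - (mana.map (fun m => max 0 (target - m))).sum
    = mana.sum - target * (mana.length : Int) := by
  induction mana with
  | nil => simp
  | cons x xs ih =>
    simp only [List.map_cons, List.sum_cons, List.length_cons]
    push_cast
    have hx : max 0 (x - target) - max 0 (target - x) = x - target := by omega
    have hlen : target * ((xs.length : Int) + 1) = target * (xs.length : Int) + target := by ring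
    omega

-- monotone access on a sorted list
theorem caGetD_mono (s : List Int) (hs : s.Pairwise (· ≤ ·)) (i j : Nat)
    (hij : i ≤ j) (hj : j < s.length) : s.getD i 0 ≤ s.getD j 0 := by
  rcases Nat.lt_or_ge i j with h | h
  · rw [List.getD_eq_getElem s 0 (Nat.lt_trans h hj), List.getD_eq_getElem s 0 hj]
    exact (List.pairwise_iff_getElem.mp hs) i j (Nat.lt_trans h hj) hj h
  · have : i = j := Nat.le_antisymm hij h
    subst this; exact le_refl _

-- binary-search invariant: the result splits s into a prefix of elements < target and a suffix of elements ≥ target.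
theorem caBsearch_spec (s : List Int) (target : Int) (hs : s.Pairwise (· ≤ ·)) :
    ∀ (n lo hi : Nat), hi - lo ≤ n → lo ≤ hi → hi ≤ s.length →
    (∀ i, i < lo → s.getD i 0 < target) →
    (∀ j, hi ≤ j → j < s.length → ¬ s.getD j 0 < target) →
    (caBsearch s target lo hi ≤ s.length ∧
     (∀ i, i < caBsearch s target lo hi → s.getD i 0 < target) ∧
     (∀ j, caBsearch s target lo hi ≤ j → j < s.length → ¬ s.getD j 0 < target)) := by
  intro n
  induction n with
  | zero =>
    intro lo hi hn hle hhi hlo hge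
    have : ¬ lo < hi := by omega
    rw [caBsearch, dif_neg this]
    have heq : lo = hi := by omega
    exact ⟨by omega, hlo, by rw [heq]; exact hge⟩
  | succ n ih =>
    intro lo hi hn hle hhi hlo hge
    by_cases h : lo < hi
    · rw [caBsearch, dif_pos h]
      simp only
      by_cases hm : s.getD ((lo + hi) / 2) 0 < target
      · rw [if_pos hm]
        apply ih ((lo + hi) / 2 + 1) hi (by omega) (by omega) hhi
        · intro i hi'
          rcases Nat.lt_or_ge i lo with h' | h'
          · exact hlo i h'
          · exact lt_of_le_of_lt (caGetD_mono s hs i ((lo + hi) / 2) (by omega) (by omega)) hm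
        · exact hge
      · rw [if_neg hm]
        apply ih lo ((lo + hi) / 2) (by omega) (by omega) (by omega) hlo
        intro j hj hj' hlt
        exact hm (lt_of_le_of_lt (caGetD_mono s hs ((lo + hi) / 2) j hj hj') hlt)
    · rw [caBsearch, dif_neg h]
      have heq : lo = hi := by omega
      exact ⟨by omega, hlo, by rw [heq]; exact hge⟩

-- deficit sum over a list of elements all < target
theorem caSum_lt (target : Int) (l : List Int) (h : ∀ x ∈ l, x < target) :
    (l.map (fun m => max 0 (target - m))).sum = target * (l.length : Int) - l.sum := by
  induction l with
  | nil => simp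
  | cons x xs ih =>
    simp only [List.map_cons, List.sum_cons, List.length_cons]
    rw [ih (fun y hy => h y (List.mem_cons_of_mem _ hy))]
    have hx := h x (List.mem_cons_self)
    have h1 : max 0 (target - x) = target - x := by omega
    push_cast
    have hlen : target * ((xs.length : Int) + 1) = target * (xs.length : Int) + target := by ring
    omega

-- deficit sum over a list of elements all ≥ target is 0
theorem caSum_ge (target : Int) (l : List Int) (h : ∀ x ∈ l, ¬ x < target) :
    (l.map (fun m => max 0 (target - m))).sum = 0 := by
  induction l with
  | nil => simp
  | cons x xs ih =>
    simp only [List.map_cons, List.sum_cons]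
    rw [ih (fun y hy => h y (List.mem_cons_of_mem _ hy))]
    have hx := h x (List.mem_cons_self)
    omega

-- B's prefix-sum formula computes the deficit sum of mana.
theorem caNeeded_eq (target : Int) (mana : List Int) :
    (letI s := PySem.List.sorted mana (fun x => x) false
     letI r := caBsearch s target 0 s.length
     target * (r : Int) - (s.take r).sum)
    = (mana.map (fun m => max 0 (target - m))).sum := by
  have hperm : (PySem.List.sorted mana (fun x => x) false).Perm mana := PySem.List.sorted_perm mana (fun x => x) false
  set s := PySem.List.sorted mana (fun x => x) false with hsdef
  have hs : s.Pairwise (· ≤ ·) := PySem.List.sorted_pairwise mana (fun x => x)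
  set r := caBsearch s target 0 s.length with hrdef
  obtain ⟨hr_le, hlt, hge⟩ :=
    caBsearch_spec s target hs s.length 0 s.length (by omega) (by omega) (le_refl _)
      (by intro i hi; omega) (by intro j hj hj'; omega)
  have htake : ∀ x ∈ s.take r, x < target := by
    intro x hx
    obtain ⟨i, hi, hxi⟩ := List.getElem_of_mem hx
    have hi' : i < r := by
      have := List.length_take (l := s) (i := r) ▸ hi
      omega
    have : (s.take r)[i] = s[i]'(by omega) := List.getElem_take ..
    rw [this] at hxi
    have := hlt i hi'
    rw [List.getD_eq_getElem s 0 (by omega)] at this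
    omega
  have hdrop : ∀ x ∈ s.drop r, ¬ x < target := by
    intro x hx
    obtain ⟨i, hi, hxi⟩ := List.getElem_of_mem hx
    have hi' : r + i < s.length := by
      have := List.length_drop (i := r) (l := s) ▸ hi
      omega
    have : (s.drop r)[i] = s[r + i]'hi' := List.getElem_drop ..
    rw [this] at hxi
    have := hge (r + i) (by omega) hi'
    rw [List.getD_eq_getElem s 0 hi'] at this
    omega
  have hsplit : s = s.take r ++ s.drop r := (List.take_append_drop r s).symm
  have hmaps : ((s.take r ++ s.drop r).map (fun m => max 0 (target - m))).sum
      = target * (r : Int) - (s.take r).sum := by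
    rw [List.map_append, List.sum_append, caSum_lt target _ htake, caSum_ge target _ hdrop]
    have hlen : (s.take r).length = r := by
      rw [List.length_take]; omega
    rw [hlen]; ring
  calc target * (r : Int) - (s.take r).sum
      = ((s.take r ++ s.drop r).map (fun m => max 0 (target - m))).sum := hmaps.symm
    _ = (s.map (fun m => max 0 (target - m))).sum := by rw [← hsplit]
    _ = (mana.map (fun m => max 0 (target - m))).sum := (hperm.map _).sum_eq

-- ===== VERDICT (by name: the statement is the Claim_ definition above) =====
theorem can_achieve_spec : Claim_equal_can_achieve := by
  intro target k mana _
  unfold Spec_can_achieve can_achieve can_achieve_alt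
  have hperm : (PySem.List.sorted mana (fun x => x) false).Perm mana := PySem.List.sorted_perm mana (fun x => x) false
  have hneed := caNeeded_eq target mana
  have hbal := canAchieve_balance target mana
  simp only [canAchieve_loopA, zero_add] at *
  set s := PySem.List.sorted mana (fun x => x) false with hsdef
  set r := caBsearch s target 0 s.length with hrdef
  have hsum : s.sum = mana.sum := hperm.sum_eq
  have hlen : s.length = mana.length := hperm.length_eq
  rw [hneed, hsum, hlen, Bool.and_comm]
  congr 1
  simp only [decide_eq_decide, ge_iff_le]
  set N := (mana.map (fun m => max 0 (target - m))).sum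
  set Av := (mana.map (fun m => max 0 (m - target))).sum
  omega
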